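-- pv_equiv track=rewrite | github.com/foss-for-synopsys-dwc-arc-processors/platformio-metaware-riscv | builder/main.py | _parseSdccFlags
-- ===== SOURCE A (Python) =====
-- def _parseSdccFlags(flags):
--     assert flags
--     if isinstance(flags, list):
--         flags = " ".join(flags)
--     flags = str(flags)
--     parsed_flags = []
--     unparsed_flags = []
--     prev_token = ""
--     for token in flags.split(" "):
--         if prev_token.startswith("--") and not token.startswith("-"):
--             parsed_flags.extend([prev_token, token])
--             prev_token = ""
--             continue
--         if prev_token:
--             unparsed_flags.append(prev_token)
--         prev_token = token
--     unparsed_flags.append(prev_token)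
--     return (parsed_flags, unparsed_flags)
-- ===== SOURCE B (Python) =====
-- def _parseSdccFlags(flags):
--     assert flags
--     if isinstance(flags, list):
--         flags = " ".join(flags)
--     tokens = str(flags).split(" ")
--     parsed = []
--     unparsed = []
--     i = 0
--     n = len(tokens)
--     while i < n:
--         if tokens[i].startswith("--") and i + 1 < n and not tokens[i + 1].startswith("-"):
--             parsed.append(tokens[i])
--             parsed.append(tokens[i + 1])
--             i += 2
--         else:
--             if tokens[i]:
--                 unparsed.append(tokens[i])
--             i += 1
--     return (parsed, unparsed)
-- ===== Notes on version B (the rewrite author's own statement) =====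
-- stated objective: simpler
-- what changed: Replaces A's one-token-delayed fold over a prev_token state (with an unconditional final flush of the leftover state) by a direct index scan that pairs a '--' option with its following value via two-token lookahead and keeps only nonempty tokens in the unparsed list.
-- intended difference: On flags ending in a space or whose final token is consumed as the value of a '--' option, A's unparsed list carries a leftover empty-string entry produced by its unconditional final prev_token append (e.g. A('--o x') = (['--o','x'], [''])); B returns only the nonempty unparsed tokens ((['--o','x'], [])), the intended flag list since an empty string is not a flag. — e.g. on _parseSdccFlags("--o x"): A returns (["--o", "x"], [""]), B returns (["--o", "x"], [])
import Mathlib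
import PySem

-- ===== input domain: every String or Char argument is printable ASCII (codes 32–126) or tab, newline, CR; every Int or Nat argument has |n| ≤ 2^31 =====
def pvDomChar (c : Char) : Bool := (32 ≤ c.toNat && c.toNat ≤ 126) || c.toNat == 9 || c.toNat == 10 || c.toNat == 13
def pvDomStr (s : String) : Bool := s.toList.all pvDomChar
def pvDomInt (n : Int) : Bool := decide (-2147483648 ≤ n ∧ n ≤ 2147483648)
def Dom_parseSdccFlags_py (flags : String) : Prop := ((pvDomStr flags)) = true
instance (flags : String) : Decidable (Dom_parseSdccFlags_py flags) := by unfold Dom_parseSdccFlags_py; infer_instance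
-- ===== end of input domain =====

-- B replaces A's trailing-state (prev_token) fold by a direct two-token-lookahead index scan
-- that keeps only nonempty unparsed tokens (simpler decomposition, same cost).

-- flags.split(" "): sep " " is nonempty, so split? is always `some`; getD [] is never taken
def pvTokens (flags : String) : List String := (PySem.Str.split? flags " ").getD []

-- the pairing test both Pythons literally perform: token.startswith("--") and not next.startswith("-")
def pvIsPair (t u : String) : Bool :=
  PySem.Str.startswith t "--" && !(PySem.Str.startswith u "-")

-- ===== PORT A =====
-- one loop iteration of A: state = (parsed_flags, unparsed_flags, prev_token)
def pvAStep (st : List String × List String × String) (token : String) :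
    List String × List String × String :=
  if pvIsPair st.2.2 token then
    (st.1 ++ [st.2.2, token], st.2.1, "")
  else
    (st.1, (if st.2.2 ≠ "" then st.2.1 ++ [st.2.2] else st.2.1), token)

def parseSdccFlags_py (flags : String) : List String × List String :=
  let st := (pvTokens flags).foldl pvAStep ([], [], "")
  (st.1, st.2.1 ++ [st.2.2])

-- ===== PORT B =====
-- the while-loop of Source B as structural recursion on the token suffix
def pvBGo : List String → List String × List String
  | [] => ([], [])
  | [t] => ([], if t ≠ "" then [t] else [])
  | t :: u :: rest =>
    if pvIsPair t u then
      let r := pvBGo rest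
      (t :: u :: r.1, r.2)
    else
      let r := pvBGo (u :: rest)
      (r.1, if t ≠ "" then t :: r.2 else r.2)

def parseSdccFlags_py_alt (flags : String) : List String × List String :=
  pvBGo (pvTokens flags)

-- ===== PRECONDITION & SPEC =====
-- A's `assert flags` raises AssertionError on the empty string; Pre_ excludes exactly that input.
def Pre_parseSdccFlags_py (flags : String) : Prop := flags ≠ ""
instance (flags : String) : Decidable (Pre_parseSdccFlags_py flags) := by
  unfold Pre_parseSdccFlags_py; infer_instance

def pvWitness_parseSdccFlags_py : String := "--model-small x -y"

-- On flags ending in a space or whose final token is consumed as the value of a '--' option,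
-- A's unparsed list carries a leftover empty-string entry from its unconditional final
-- prev_token append; B keeps only nonempty unparsed tokens, the intended flag list.
-- (closed form: over the space-separated pieces of flags, the last piece is empty, or the
--  last two pieces are a '--…' piece followed by a piece not starting with '-')
def D_parseSdccFlags_py (flags : String) : Prop :=
  let ts := PySem.Chars.splitOn flags.toList [' ']
  ts.getLastD [] = [] ∨ (['-', '-'] <+: ts.dropLast.getLastD [] ∧ ¬ ['-'] <+: ts.getLastD [])
instance (flags : String) : Decidable (D_parseSdccFlags_py flags) := by
  unfold D_parseSdccFlags_py; infer_instance

def Spec_parseSdccFlags_py (flags : String) (out : List String × List String) : Prop :=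
  ¬ D_parseSdccFlags_py flags → out = parseSdccFlags_py_alt flags
instance (flags : String) (out : List String × List String) : Decidable (Spec_parseSdccFlags_py flags out) := by unfold Spec_parseSdccFlags_py; infer_instance

def pvDiffWitness_parseSdccFlags_py : String := "--o x"
def pvDiffWitnessOut_parseSdccFlags_py : (List String × List String) × (List String × List String) :=
  ((["--o", "x"], [""]), (["--o", "x"], []))

-- ===== CLAIM (what is proved, stated in full; the proofs are below) =====
def Claim_unchanged_parseSdccFlags_py : Prop := ∀ (flags : String), Dom_parseSdccFlags_py flags → Pre_parseSdccFlags_py flags → Spec_parseSdccFlags_py flags (parseSdccFlags_py flags)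
def Claim_changed_parseSdccFlags_py : Prop := Dom_parseSdccFlags_py (pvDiffWitness_parseSdccFlags_py) ∧ Pre_parseSdccFlags_py (pvDiffWitness_parseSdccFlags_py) ∧ D_parseSdccFlags_py (pvDiffWitness_parseSdccFlags_py) ∧ parseSdccFlags_py (pvDiffWitness_parseSdccFlags_py) = pvDiffWitnessOut_parseSdccFlags_py.1 ∧ parseSdccFlags_py_alt (pvDiffWitness_parseSdccFlags_py) = pvDiffWitnessOut_parseSdccFlags_py.2 ∧ pvDiffWitnessOut_parseSdccFlags_py.1 ≠ pvDiffWitnessOut_parseSdccFlags_py.2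
def Claim_exact_parseSdccFlags_py : Prop := ∀ (flags : String), Dom_parseSdccFlags_py flags → Pre_parseSdccFlags_py flags → D_parseSdccFlags_py flags → parseSdccFlags_py flags ≠ parseSdccFlags_py_alt flags

-- ===== LEMMAS AND PROOFS =====

-- proof-side: whether the greedy left-to-right scan ends by consuming the final token
def pvDScan : List String → Bool
  | [] => true
  | [_] => false
  | t :: u :: rest => if pvIsPair t u then pvDScan rest else pvDScan (u :: rest)

-- proof-side: whether the last two tokens form an option/value pair
def pvEnds (ts : List String) : Bool :=
  match ts.dropLast.getLast?, ts.getLast? with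
  | some t, some u => PySem.Str.startswith t "--" && !(PySem.Str.startswith u "-")
  | _, _ => false

lemma pvTok_eq (flags : String) :
    pvTokens flags = (PySem.Chars.splitOn flags.toList [' ']).map String.ofList := by
  simp [pvTokens, PySem.Str.split?, PySem.Chars.split?]

lemma pvEnds_map (ts : List (List Char)) :
    pvEnds (ts.map String.ofList) = true ↔
      ((['-', '-'] <+: ts.dropLast.getLastD []) ∧ ¬ (['-'] <+: ts.getLastD [])) := by
  unfold pvEnds
  rw [← List.map_dropLast, List.getLast?_map, List.getLast?_map,
      List.getLastD_eq_getLast?, List.getLastD_eq_getLast?]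
  cases h1 : ts.dropLast.getLast? with
  | none => simp
  | some t =>
      cases h2 : ts.getLast? with
      | none =>
          have h0 : ts = [] := List.getLast?_eq_none_iff.mp h2
          rw [h0] at h1; simp at h1
      | some u =>
          simp only [Option.map_some, Option.getD_some]
          constructor
          · intro h
            have hb : PySem.Str.startswith (String.ofList t) "--" = true ∧
                      PySem.Str.startswith (String.ofList u) "-" = false := by
              constructor
              · exact (Bool.and_eq_true _ _).mp h |>.1
              · have := (Bool.and_eq_true _ _).mp h |>.2
                simpa using this
            refine ⟨?_, ?_⟩
            · have := (PySem.Chars.startswith_iff _ _).mp (by simpa using hb.1)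
              simpa using this
            · intro hpre
              have : PySem.Chars.startswith (String.ofList u).toList ['-'] = true := by
                apply (PySem.Chars.startswith_iff _ _).mpr
                simpa using hpre
              have hb2 := hb.2
              simp only [PySem.Str.startswith_eq] at hb2
              simp at hb2 this
              rw [this] at hb2
              exact absurd hb2 (by simp)
          · rintro ⟨hp1, hp2⟩
            apply (Bool.and_eq_true _ _).mpr
            constructor
            · have : PySem.Chars.startswith (String.ofList t).toList ("--".toList) = true := by
                apply (PySem.Chars.startswith_iff _ _).mpr
                simpa using hp1
              simpa using this
            · have : PySem.Chars.startswith (String.ofList u).toList ("-".toList) = false := by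
                cases hx : PySem.Chars.startswith (String.ofList u).toList ("-".toList) with
                | false => rfl
                | true =>
                    exfalso
                    apply hp2
                    have := (PySem.Chars.startswith_iff _ _).mp hx
                    simpa using this
              simp only [PySem.Str.startswith_eq]
              simp at this ⊢
              simp [this]
          
lemma pvD_iff (flags : String) :
    D_parseSdccFlags_py flags ↔
      ((pvTokens flags).getLastD "" = "" ∨ pvEnds (pvTokens flags) = true) := by
  unfold D_parseSdccFlags_py
  rw [pvTok_eq, pvEnds_map]
  apply or_congr
  · rw [List.getLastD_eq_getLast?, List.getLastD_eq_getLast?, List.getLast?_map]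
    cases (PySem.Chars.splitOn flags.toList [' ']).getLast? with
    | none => simp
    | some a => simp
  · exact Iff.rfl

-- proof-side reformulation of A's fold: state machine as structural recursion,
-- result = (parsed, unparsed-without-final-prev, "did the scan end on a completed pair")
def pvAGo : List String → List String × List String × Bool
  | [] => ([], [], true)
  | [t] => ([], [t], false)
  | t :: u :: rest =>
    if pvIsPair t u then
      let r := pvAGo rest
      (t :: u :: r.1, r.2.1, r.2.2)
    else
      let r := pvAGo (u :: rest)
      (r.1, (if t ≠ "" then t :: r.2.1 else r.2.1), r.2.2)

lemma pvEmpty_not_dash (t : String) : pvIsPair "" t = false := by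
  have h : PySem.Chars.startswith ([] : List Char) ['-', '-'] = false := by decide
  simp [pvIsPair, PySem.Str.startswith, h]

lemma pvStep0 (p u : List String) (t : String) : pvAStep (p, u, "") t = (p, u, t) := by
  simp [pvAStep, pvEmpty_not_dash]

-- A's fold agrees with the assembled pvAGo recursion
lemma pvMain (ts : List String) : ∀ (p u : List String),
    (let st := ts.foldl pvAStep (p, u, ""); (st.1, st.2.1 ++ [st.2.2]))
      = (p ++ (pvAGo ts).1,
         u ++ (if (pvAGo ts).2.2 then (pvAGo ts).2.1 ++ [""] else (pvAGo ts).2.1)) := by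
  induction ts using pvAGo.induct with
  | case1 => intro p u; simp [pvAGo]
  | case2 t => intro p u; simp [pvAGo, List.foldl, pvStep0]
  | case3 t u' rest hcond ih =>
      intro p u
      have h2 : pvAStep (p, u, t) u' = (p ++ [t, u'], u, "") := by
        simp only [pvAStep, if_pos hcond]
      simp only [List.foldl, pvStep0, h2, pvAGo, hcond, if_true]
      have := ih (p ++ [t, u']) u
      simp only [] at this
      rw [this]
      simp
  | case4 t u' rest hcond ih =>
      intro p u
      have h2 : pvAStep (p, u, t) u' =
          (p, (if t ≠ "" then u ++ [t] else u), u') := by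
        simp only [pvAStep, if_neg hcond]
      have key : (u' :: rest).foldl pvAStep (p, (if t ≠ "" then u ++ [t] else u), "")
          = rest.foldl pvAStep (p, (if t ≠ "" then u ++ [t] else u), u') := by
        simp [List.foldl, pvStep0]
      have := ih p (if t ≠ "" then u ++ [t] else u)
      simp only [key] at this
      simp only [List.foldl, pvStep0, h2]
      rw [this]
      simp only [pvAGo, hcond, if_false, Bool.false_eq_true]
      by_cases ht : t = "" <;> by_cases hf : (pvAGo (u' :: rest)).2.2 <;>
        simp [ht, hf]

-- relation between pvAGo and (pvBGo, pvDScan, last token)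
lemma pvCmp (ts : List String) :
    (pvAGo ts).1 = (pvBGo ts).1 ∧ (pvAGo ts).2.2 = pvDScan ts ∧
    ((pvAGo ts).2.2 = true → (pvAGo ts).2.1 = (pvBGo ts).2) ∧
    ((pvAGo ts).2.2 = false →
      (pvAGo ts).2.1
        = (pvBGo ts).2 ++ (if ts.getLast? = some "" then [""] else [])) := by
  induction ts using pvAGo.induct with
  | case1 => simp [pvAGo, pvBGo, pvDScan]
  | case2 t =>
      by_cases ht : t = "" <;> simp [pvAGo, pvBGo, pvDScan, ht]
  | case3 t u rest hcond ih =>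
      obtain ⟨h1, h2, h3, h4⟩ := ih
      have eA : pvAGo (t :: u :: rest)
          = (t :: u :: (pvAGo rest).1, (pvAGo rest).2.1, (pvAGo rest).2.2) := by
        simp [pvAGo, hcond]
      have eB : pvBGo (t :: u :: rest)
          = (t :: u :: (pvBGo rest).1, (pvBGo rest).2) := by
        simp [pvBGo, hcond]
      have eD : pvDScan (t :: u :: rest) = pvDScan rest := by
        simp [pvDScan, hcond]
      refine ⟨?_, ?_, ?_, ?_⟩ <;> simp only [eA, eB, eD]
      · rw [h1]
      · exact h2
      · exact h3
      · intro h
        have hne : rest ≠ [] := by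
          intro hnil; rw [hnil] at h; simp [pvAGo] at h
        have hgl : (t :: u :: rest).getLast? = rest.getLast? := by
          cases rest with
          | nil => exact absurd rfl hne
          | cons a l => simp [List.getLast?_cons_cons]
        rw [hgl]
        exact h4 h
  | case4 t u rest hcond ih =>
      obtain ⟨h1, h2, h3, h4⟩ := ih
      have eA : pvAGo (t :: u :: rest)
          = ((pvAGo (u :: rest)).1,
             (if t ≠ "" then t :: (pvAGo (u :: rest)).2.1 else (pvAGo (u :: rest)).2.1),
             (pvAGo (u :: rest)).2.2) := by
        simp only [pvAGo, if_neg hcond]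
      have eB : pvBGo (t :: u :: rest)
          = ((pvBGo (u :: rest)).1,
             (if t ≠ "" then t :: (pvBGo (u :: rest)).2 else (pvBGo (u :: rest)).2)) := by
        simp only [pvBGo, if_neg hcond]
      have eD : pvDScan (t :: u :: rest) = pvDScan (u :: rest) := by
        simp only [pvDScan, if_neg hcond]
      have hgl : (t :: u :: rest).getLast? = (u :: rest).getLast? := by
        simp [List.getLast?_cons_cons]
      refine ⟨?_, ?_, ?_, ?_⟩ <;> simp only [eA, eB, eD, hgl]
      · exact h1
      · exact h2
      · intro h; rw [h3 h]
      · intro h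
        rw [h4 h]
        by_cases ht : t = "" <;> simp [ht]

-- A's output in closed form relative to B's
lemma pvAB (flags : String) :
    parseSdccFlags_py flags
      = ((parseSdccFlags_py_alt flags).1,
         (parseSdccFlags_py_alt flags).2 ++
           (if pvDScan (pvTokens flags) then [""]
            else if (pvTokens flags).getLast? = some "" then [""] else [])) := by
  unfold parseSdccFlags_py parseSdccFlags_py_alt
  have hm := pvMain (pvTokens flags) [] []
  simp only [List.nil_append] at hm
  obtain ⟨h1, h2, h3, h4⟩ := pvCmp (pvTokens flags)
  rw [hm, h1]
  by_cases hf : (pvAGo (pvTokens flags)).2.2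
  · rw [← h2]; simp [hf, h3 hf]
  · have hf' : (pvAGo (pvTokens flags)).2.2 = false := by simpa using hf
    rw [← h2, hf']
    simp only [Bool.false_eq_true, if_false]
    rw [h4 hf']

-- pvEnds ignores everything but the last two tokens
lemma pvEnds_cons (t u : String) (r : List String) (hr : r ≠ []) :
    pvEnds (t :: u :: r) = pvEnds (u :: r) := by
  cases r with
  | nil => exact absurd rfl hr
  | cons a l =>
      simp [pvEnds, List.dropLast, List.getLast?_cons_cons]

-- a string that does not start with "-" does not start with "--"
lemma pvDash (u : String) (h : PySem.Str.startswith u "-" = false) :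
    PySem.Str.startswith u "--" = false := by
  by_contra hc
  have hc' : PySem.Str.startswith u "--" = true := by
    cases hx : PySem.Str.startswith u "--" with
    | false => exact absurd hx hc
    | true => rfl
  have h2 : PySem.Chars.startswith u.toList ("--".toList) = true := by
    simpa using hc'
  have h3 : ("--".toList) <+: u.toList := (PySem.Chars.startswith_iff _ _).mp h2
  have h4 : ("-".toList) <+: u.toList := by
    refine List.IsPrefix.trans ?_ h3
    decide
  have h5 : PySem.Str.startswith u "-" = true := by
    have := (PySem.Chars.startswith_iff u.toList ("-".toList)).mpr h4
    simpa using this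
  rw [h] at h5
  exact absurd h5 (by simp)

-- for a nonempty token list the scan ends on a pair iff the last two tokens pair up
lemma pvDScan_ends : ∀ (ts : List String), ts ≠ [] → pvDScan ts = pvEnds ts := by
  intro ts
  induction ts using pvDScan.induct with
  | case1 => intro h; exact absurd rfl h
  | case2 t => intro _; simp [pvDScan, pvEnds]
  | case3 t u rest hcond ih =>
      intro _
      cases rest with
      | nil =>
          have hp := hcond
          simp only [pvIsPair] at hp
          simp at hp
          simp [pvDScan, pvEnds, List.dropLast, hcond]
          exact hp
      | cons a l =>
          have hr : pvDScan (t :: u :: a :: l) = pvDScan (a :: l) := by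
            simp [pvDScan, hcond]
          rw [hr, ih (by simp)]
          cases l with
          | nil =>
              -- last two tokens are (u, a); u is a pair value, so it cannot start with "--"
              have hu : PySem.Str.startswith u "-" = false := by
                have := hcond
                simp only [pvIsPair, Bool.and_eq_true, Bool.not_eq_true'] at this
                exact this.2
              have hu2 := pvDash u hu
              simp [pvEnds, List.dropLast]
              intro hx
              simp at hu2
              simp [hu2] at hx
          | cons b l2 =>
              rw [pvEnds_cons t u (a :: b :: l2) (by simp),
                  pvEnds_cons u a (b :: l2) (by simp)]
  | case4 t u rest hcond ih =>
      intro _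
      have hr : pvDScan (t :: u :: rest) = pvDScan (u :: rest) := by
        simp [pvDScan, hcond]
      rw [hr, ih (by simp)]
      cases rest with
      | nil =>
          have hp : (PySem.Str.startswith t "--" && !PySem.Str.startswith u "-") = false := by
            simpa [pvIsPair] using hcond
          simp [pvEnds, List.dropLast]
          intro hx
          simp at hp
          tauto
      | cons a l => rw [pvEnds_cons t u (a :: l) (by simp)]

-- the two disjuncts of D_ read off pvDScan and the last token
lemma pvDSplit (flags : String) (h1 : ¬ (pvTokens flags).getLastD "" = "")
    (h2 : ¬ pvEnds (pvTokens flags) = true) :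
    pvDScan (pvTokens flags) = false ∧ (pvTokens flags).getLast? ≠ some "" := by
  have hne : pvTokens flags ≠ [] := by
    intro hnil; rw [hnil] at h1; exact h1 rfl
  constructor
  · rw [pvDScan_ends _ hne]
    cases hx : pvEnds (pvTokens flags) with
    | false => rfl
    | true => exact absurd hx h2
  · intro hsome
    apply h1
    rw [List.getLastD_eq_getLast?, hsome]
    rfl

-- ===== VERDICT (by name: the statements are the Claim_ definitions above) =====
theorem parseSdccFlags_py_spec : Claim_unchanged_parseSdccFlags_py := by
  intro flags _ _
  unfold Spec_parseSdccFlags_py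
  intro hD
  rw [pvD_iff] at hD
  rw [not_or] at hD
  obtain ⟨hsc, hlast⟩ := pvDSplit flags hD.1 hD.2
  rw [pvAB flags]
  simp [hsc, hlast]

theorem parseSdccFlags_py_changed : Claim_changed_parseSdccFlags_py := by
  unfold Claim_changed_parseSdccFlags_py; decide

theorem parseSdccFlags_py_tight : Claim_exact_parseSdccFlags_py := by
  intro flags _ _ hD heq
  rw [pvAB flags] at heq
  have h2 := congrArg Prod.snd heq
  simp only [] at h2
  by_cases hsc : pvDScan (pvTokens flags) = true
  · simp [hsc] at h2
  · -- the scan does not end on a pair; D_ then forces the last token to be empty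
    have hsc' : pvDScan (pvTokens flags) = false := by
      cases hx : pvDScan (pvTokens flags) with
      | false => rfl
      | true => exact absurd hx hsc
    rw [pvD_iff] at hD
    have hlast : (pvTokens flags).getLast? = some "" := by
      rcases hD with hl | hp
      · have hne : pvTokens flags ≠ [] := by
          intro hnil
          rw [hnil] at hsc'
          simp [pvDScan] at hsc'
        rw [List.getLastD_eq_getLast?] at hl
        cases hx : (pvTokens flags).getLast? with
        | none => exact absurd (List.getLast?_eq_none_iff.mp hx) hne
        | some v => rw [hx] at hl; simpa using congrArg (some ·) hl
      · have hne : pvTokens flags ≠ [] := by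
          intro hnil
          rw [hnil] at hsc'
          simp [pvDScan] at hsc'
        rw [pvDScan_ends _ hne] at hsc'
        rw [hp] at hsc'
        exact absurd hsc' (by simp)
    simp [hsc', hlast] at h2
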